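-- pv_equiv track=rewrite | github.com/jnoel01/WeBeAgile | validate.py | antiFiveBirths
-- ===== SOURCE A (Python) =====
-- def antiFiveBirths(birthdays):
--     if len(birthdays) < 0:
--         return True
--     diction = {}
--     for day in birthdays:
--         if not diction.get(day):
--             diction[day] = 1
--         else:
--             diction[day] = diction.get(day) + 1
--     for val in diction:
--         if diction.get(val) > 5:
--             return False
--     return True
-- ===== SOURCE B (Python) =====
-- def antiFiveBirths(birthdays):
--     if len(birthdays) < 0:
--         return True
--     counts = {}
--     for day in birthdays:
--         c = counts.get(day, 0) + 1
--         if c > 5: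
--             return False
--         counts[day] = c
--     return True
-- ===== Notes on version B (the rewrite author's own statement) =====
-- stated objective: faster
-- what changed: A builds the full count dict in one pass and then scans the whole dict for a value > 5; B makes a single fused pass, incrementing each day's count inline and returning False the moment any count exceeds 5.
import Mathlib
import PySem

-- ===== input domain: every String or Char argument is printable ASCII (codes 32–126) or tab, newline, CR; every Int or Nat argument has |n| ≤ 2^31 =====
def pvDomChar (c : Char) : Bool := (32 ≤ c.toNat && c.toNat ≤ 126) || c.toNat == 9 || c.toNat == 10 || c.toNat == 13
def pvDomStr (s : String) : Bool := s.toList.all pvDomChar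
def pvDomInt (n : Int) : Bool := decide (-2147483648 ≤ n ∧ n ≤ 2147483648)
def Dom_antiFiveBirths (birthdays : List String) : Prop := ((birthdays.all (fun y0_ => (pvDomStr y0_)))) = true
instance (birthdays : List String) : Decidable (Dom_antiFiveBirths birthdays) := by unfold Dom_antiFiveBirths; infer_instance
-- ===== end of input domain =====

-- B fuses A's two passes (build the count dict, then scan it) into one counting pass with early exit; same cost, plainer shape.

-- ===== PORT A =====
def antiFiveBirths (birthdays : List String) : Bool :=
  if ((birthdays.length : Int) < 0) then true
  else
    let diction := birthdays.foldl (fun d day =>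
      if (PySem.Dict.get? d day).getD 0 = 0 then PySem.Dict.insert d day 1
      else PySem.Dict.insert d day ((PySem.Dict.get? d day).getD 0 + 1)) (PySem.Dict.empty : PySem.Dict String Int)
    if (PySem.Dict.keys diction).any (fun val => decide (5 < PySem.Dict.getD diction val 0)) then false
    else true

-- ===== PORT B =====
def antiFiveBirths_altGo (counts : PySem.Dict String Int) : List String → Bool
  | [] => true
  | day :: rest =>
    let c := PySem.Dict.getD counts day 0 + 1
    if 5 < c then false
    else antiFiveBirths_altGo (PySem.Dict.insert counts day c) rest

def antiFiveBirths_alt (birthdays : List String) : Bool :=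
  if ((birthdays.length : Int) < 0) then true
  else antiFiveBirths_altGo PySem.Dict.empty birthdays

-- ===== PRECONDITION & SPEC =====
def Spec_antiFiveBirths (birthdays : List String) (out : Bool) : Prop := out = antiFiveBirths_alt birthdays
instance (birthdays : List String) (out : Bool) : Decidable (Spec_antiFiveBirths birthdays out) := by unfold Spec_antiFiveBirths; infer_instance

-- ===== CLAIM (what is proved, stated in full; the proofs are below) =====
def Claim_equal_antiFiveBirths : Prop := ∀ (birthdays : List String), Dom_antiFiveBirths birthdays → Spec_antiFiveBirths birthdays (antiFiveBirths birthdays)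

-- ===== LEMMAS AND PROOFS =====

-- A's branching fold is the plain counting fold.
theorem foldA_eq (xs : List String) :
    xs.foldl (fun d day =>
      if (PySem.Dict.get? d day).getD 0 = 0 then PySem.Dict.insert d day 1
      else PySem.Dict.insert d day ((PySem.Dict.get? d day).getD 0 + 1)) (PySem.Dict.empty : PySem.Dict String Int)
    = xs.foldl (fun d x => PySem.Dict.insert d x (PySem.Dict.getD d x 0 + 1)) PySem.Dict.empty := by
  have h : (fun (d : PySem.Dict String Int) day =>
      if (PySem.Dict.get? d day).getD 0 = 0 then PySem.Dict.insert d day 1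
      else PySem.Dict.insert d day ((PySem.Dict.get? d day).getD 0 + 1))
      = (fun d x => PySem.Dict.insert d x (PySem.Dict.getD d x 0 + 1)) := by
    funext d day
    rw [← PySem.Dict.getD_eq_get?_getD]
    split_ifs with h0
    · rw [h0]; norm_num
    · rfl
  exact congrArg (fun f => List.foldl f PySem.Dict.empty xs) h

theorem A_true_iff (xs : List String) :
    antiFiveBirths xs = true ↔ ∀ k, (xs.count k : Int) ≤ 5 := by
  unfold antiFiveBirths
  simp only [foldA_eq]
  have hlen : ¬ ((xs.length : Int) < 0) := by omega
  simp only [if_neg hlen, PySem.Dict.foldl_insert_getD_add_one_eq_counter]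
  constructor
  · intro h k
    by_cases hk : k ∈ xs
    · by_contra hgt
      simp [PySem.Dict.keys_counter, PySem.Set.mem_ofList, PySem.Dict.getD_counter] at h
      have h2 := h k hk
      omega
    · simp [List.count_eq_zero_of_not_mem hk]
  · intro h
    simp [PySem.Dict.keys_counter, PySem.Set.mem_ofList, PySem.Dict.getD_counter]
    intro x _
    have h2 := h x
    omega

theorem goB_true_iff (xs : List String) (d : PySem.Dict String Int)
    (hd : ∀ k, PySem.Dict.getD d k 0 ≤ 5) :
    antiFiveBirths_altGo d xs = true ↔ ∀ k, PySem.Dict.getD d k 0 + (xs.count k : Int) ≤ 5 := by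
  induction xs generalizing d with
  | nil => simpa [antiFiveBirths_altGo] using fun k => hd k
  | cons day rest ih =>
    unfold antiFiveBirths_altGo
    by_cases h6 : 5 < PySem.Dict.getD d day 0 + 1
    · simp only [if_pos h6, Bool.false_eq_true, false_iff]
      intro hall
      have h1 := hall day
      rw [List.count_cons_self] at h1
      push_cast at h1
      omega
    · simp only [if_neg h6]
      rw [ih _ (by
        intro k
        rw [PySem.Dict.getD_insert]
        split_ifs with hk
        · omega
        · exact hd k)]
      constructor
      · intro H k
        have h1 := H k
        rw [PySem.Dict.getD_insert] at h1
        by_cases hk : k = day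
        · subst hk
          rw [if_pos rfl] at h1
          rw [List.count_cons_self]
          push_cast
          omega
        · rw [if_neg hk] at h1
          rw [List.count_cons_of_ne (fun h => hk h.symm)]
          omega
      · intro H k
        have h1 := H k
        rw [PySem.Dict.getD_insert]
        by_cases hk : k = day
        · subst hk
          rw [List.count_cons_self] at h1
          push_cast at h1
          rw [if_pos rfl]
          omega
        · rw [List.count_cons_of_ne (fun h => hk h.symm)] at h1
          rw [if_neg hk]
          omega

theorem B_true_iff (xs : List String) :
    antiFiveBirths_alt xs = true ↔ ∀ k, (xs.count k : Int) ≤ 5 := by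
  unfold antiFiveBirths_alt
  have hlen : ¬ ((xs.length : Int) < 0) := by omega
  rw [if_neg hlen, goB_true_iff xs PySem.Dict.empty (by intro k; simp [PySem.Dict.getD_empty])]
  constructor <;> intro h k <;> have := h k <;> simp [PySem.Dict.getD_empty] at this ⊢ <;> exact this

-- ===== VERDICT (by name: the statement is the Claim_ definition above) =====
theorem antiFiveBirths_spec : Claim_equal_antiFiveBirths := by
  intro xs _
  unfold Spec_antiFiveBirths
  rw [Bool.eq_iff_iff, A_true_iff, B_true_iff]
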